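-- pv_equiv track=rewrite | github.com/matiw01/TAiG_algorytmic | Production.py | parse
-- ===== SOURCE A (Python) =====
-- def parse(input_data):
--     S = input_data[:-1]
--     S = S.replace('\n', ' ')
--     S = S.split('; ')
--     for i in range(len(S)):
--         S[i] = S[i].split(', ')
--     V = [[]]
--     idx = 0
--     idxV = 0
--     while idx < len(S):
--         if len(S[idx]) == 3 and idx > 0:
--             V.append([])
--             idxV += 1
--         V[idxV].append(S[idx])
--         idx += 1
--     return V
-- ===== SOURCE B (Python) =====
-- def parse(input_data):
--     s = input_data[:-1].replace('\n', ' ')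
--     rows = [r.split(', ') for r in s.split('; ')]
--     rev = []
--     cur = []
--     for i, row in reversed(list(enumerate(rows))):
--         cur.append(row)
--         if len(row) == 3 and i > 0:
--             rev.append(cur)
--             cur = []
--     rev.append(cur)
--     return [list(reversed(g)) for g in reversed(rev)]
-- ===== Notes on version B (the rewrite author's own statement) =====
-- stated objective: alternative
-- what changed: Replaces A's forward index-tracking while loop that mutates the last group of V via idx/idxV bookkeeping with a single reversed pass (enumerate + reversed) that accumulates the current group and emits groups back-to-front, reversing once at the end.
import Mathlib
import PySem

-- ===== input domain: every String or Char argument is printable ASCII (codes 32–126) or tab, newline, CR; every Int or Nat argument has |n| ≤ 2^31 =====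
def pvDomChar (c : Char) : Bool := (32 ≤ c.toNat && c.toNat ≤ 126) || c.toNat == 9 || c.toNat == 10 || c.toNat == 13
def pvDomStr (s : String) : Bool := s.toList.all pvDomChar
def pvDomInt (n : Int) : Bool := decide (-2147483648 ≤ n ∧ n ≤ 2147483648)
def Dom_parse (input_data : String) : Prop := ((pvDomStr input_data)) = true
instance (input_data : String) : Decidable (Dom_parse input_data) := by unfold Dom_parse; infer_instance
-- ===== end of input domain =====

-- B replaces A's forward while loop (mutating V's last group via idx/idxV) by one reversed pass
-- building the groups back-to-front; same cost, alternative decomposition.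

-- ===== PORT A =====
-- the while loop: idx counts up through S, V's group at idxV collects rows;
-- S[idx] is in range whenever the loop body runs, so getD is exact
def parseLoopA (S : List (List String)) (idx : Nat) (V : List (List (List String)))
    (idxV : Nat) : List (List (List String)) :=
  if idx < S.length then
    let row := S.getD idx []
    let VI : List (List (List String)) × Nat :=
      if row.length == 3 && decide (0 < idx) then (V ++ [[]], idxV + 1) else (V, idxV)
    let V' := VI.1.set VI.2 ((VI.1.getD VI.2 []) ++ [row])
    parseLoopA S (idx + 1) V' VI.2
  else V
termination_by S.length - idx

def parse (input_data : String) : List (List (List String)) :=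
  let s0 := PySem.Str.slice input_data none (some (-1))      -- input_data[:-1]
  let s1 := PySem.Str.replace s0 "\n" " "
  -- '; ' and ', ' are nonempty separators, so split? is always some: getD is exact
  let S : List (List String) :=
    ((PySem.Str.split? s1 "; ").getD []).map (fun r => (PySem.Str.split? r ", ").getD [])
  parseLoopA S 0 [[]] 0

-- ===== PORT B =====
def parse_alt (input_data : String) : List (List (List String)) :=
  let s := PySem.Str.replace (PySem.Str.slice input_data none (some (-1))) "\n" " "
  let rows : List (List String) :=
    ((PySem.Str.split? s "; ").getD []).map (fun r => (PySem.Str.split? r ", ").getD [])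
  -- for i, row in reversed(list(enumerate(rows))): …
  let st :=
    (PySem.List.enumerate rows).reverse.foldl
      (fun (st : List (List (List String)) × List (List String)) p =>
        let cur := st.2 ++ [p.2]
        if p.2.length == 3 && decide (0 < p.1) then (st.1 ++ [cur], ([] : List (List String)))
        else (st.1, cur))
      ([], [])
  ((st.1 ++ [st.2]).reverse).map List.reverse

-- ===== PRECONDITION & SPEC =====
def Spec_parse (input_data : String) (out : List (List (List String))) : Prop := out = parse_alt input_data
instance (input_data : String) (out : List (List (List String))) : Decidable (Spec_parse input_data out) := by unfold Spec_parse; infer_instance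

-- ===== CLAIM (what is proved, stated in full; the proofs are below) =====
def Claim_equal_parse : Prop := ∀ (input_data : String), Dom_parse input_data → Spec_parse input_data (parse input_data)

-- ===== LEMMAS AND PROOFS =====

-- glue a list onto the front of the first group (or start one)
def prep {α : Type} (g : List α) : List (List α) → List (List α)
  | [] => [g]
  | h :: t => (g ++ h) :: t

-- canonical grouping of the rows after the first: a length-3 row opens a new group
def Hgrp : List (List String) → List (List (List String))
  | [] => [[]]
  | r :: t => if r.length = 3 then [] :: prep [r] (Hgrp t) else prep [r] (Hgrp t)

theorem prep_prep {α : Type} (g r : List α) (gs : List (List α)) :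
    prep g (prep r gs) = prep (g ++ r) gs := by
  cases gs <;> simp [prep]

theorem getD_append_length {α : Type} (W : List α) (g d : α) :
    (W ++ [g]).getD W.length d = g := by
  induction W with
  | nil => rfl
  | cons x xs ih => simpa [List.getD] using ih

theorem set_append_length {α : Type} (W : List α) (g x : α) :
    (W ++ [g]).set W.length x = W ++ [x] := by
  induction W with
  | nil => rfl
  | cons y ys ih => simp [ih]

theorem parseLoopA_spec (rest : List (List String)) :
    ∀ (S : List (List String)) (idx : Nat) (W : List (List (List String))) (g : List (List String)),
      1 ≤ idx → S.drop idx = rest →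
      parseLoopA S idx (W ++ [g]) W.length = W ++ prep g (Hgrp rest) := by
  induction rest with
  | nil =>
    intro S idx W g hidx hdrop
    have hlen : S.length ≤ idx := by
      by_contra h
      exact absurd hdrop (by simp [List.drop_eq_nil_iff]; omega)
    rw [parseLoopA]
    simp [Nat.not_lt.mpr hlen, Hgrp, prep]
  | cons r rest' ih =>
    intro S idx W g hidx hdrop
    have hlt : idx < S.length := by
      by_contra h
      rw [List.drop_eq_nil_iff.mpr (by omega)] at hdrop
      simp at hdrop
    have h1 : S[idx]? = some r := by
      rw [← List.head?_drop, hdrop]; rfl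
    have hrow : S.getD idx [] = r := by
      simp [List.getD, h1]
    have hdrop' : S.drop (idx + 1) = rest' := by
      have := congrArg List.tail hdrop
      simpa [List.tail_drop] using this
    rw [parseLoopA]
    simp only [hlt, if_true, hrow]
    by_cases h3 : r.length = 3
    · have hc : (r.length == 3 && decide (0 < idx)) = true := by
        simp [h3]; omega
      simp only [hc, if_true]
      have e1 : (W ++ [g] ++ [[]] : List (List (List String))).getD (W.length + 1) [] = [] := by
        have := getD_append_length (W ++ [g]) ([] : List (List String)) []
        simpa using this
      have e2 : (W ++ [g] ++ [[]] : List (List (List String))).set (W.length + 1) [r]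
          = (W ++ [g]) ++ [[r]] := by
        have := set_append_length (W ++ [g]) ([] : List (List String)) [r]
        simpa using this
      simp only [e1, List.nil_append, e2]
      have := ih S (idx + 1) (W ++ [g]) [r] (by omega) hdrop'
      simp only [List.length_append, List.length_cons, List.length_nil] at this ⊢
      rw [this]
      simp [Hgrp, h3, prep]
    · have hc : (r.length == 3 && decide (0 < idx)) = false := by
        simp [h3]
      simp only [hc, if_false, Bool.false_eq_true]
      rw [getD_append_length, set_append_length]
      rw [ih S (idx + 1) W (g ++ [r]) (by omega) hdrop']
      rw [Hgrp, if_neg h3, prep_prep]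

-- the reversed-enumerate fold, as structural recursion on the rows after the first
def Rb : List (List String) → List (List (List String)) × List (List String)
  | [] => ([], [])
  | r :: t =>
    if r.length = 3 then ((Rb t).1 ++ [(Rb t).2 ++ [r]], []) else ((Rb t).1, (Rb t).2 ++ [r])

theorem foldr_enumerate_eq_Rb (t : List (List String)) :
    ∀ (s : Int), 1 ≤ s →
      (PySem.List.enumerate t s).foldr
        (fun p (st : List (List (List String)) × List (List String)) =>
          let cur := st.2 ++ [p.2]
          if p.2.length == 3 && decide (0 < p.1) then (st.1 ++ [cur], ([] : List (List String)))
          else (st.1, cur))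
        ([], []) = Rb t := by
  induction t with
  | nil => intro s _; simp [PySem.List.enumerate_nil, Rb]
  | cons r t' ih =>
    intro s hs
    rw [PySem.List.enumerate_cons, List.foldr_cons, ih (s + 1) (by omega)]
    by_cases h3 : r.length = 3
    · simp [Rb, h3]; omega
    · simp [Rb, h3]

theorem Rb_finish (t : List (List String)) :
    ∀ (a : List String),
      (((Rb t).1 ++ [(Rb t).2 ++ [a]]).reverse).map List.reverse = prep [a] (Hgrp t) := by
  induction t with
  | nil => intro a; simp [Rb, Hgrp, prep]
  | cons r t' ih =>
    intro a
    have hr := ih r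
    by_cases h3 : r.length = 3
    · rw [Hgrp, if_pos h3, ← hr]
      simp [Rb, h3, prep, List.reverse_append]
    · rw [Hgrp, if_neg h3, ← hr]
      simp only [Rb, h3, if_false]
      simp [prep, List.reverse_append]

-- the two cores agree on any row list
theorem core_eq (S : List (List String)) :
    parseLoopA S 0 [[]] 0 =
      (let st :=
        (PySem.List.enumerate S).reverse.foldl
          (fun (st : List (List (List String)) × List (List String)) p =>
            let cur := st.2 ++ [p.2]
            if p.2.length == 3 && decide (0 < p.1) then (st.1 ++ [cur], ([] : List (List String)))
            else (st.1, cur))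
          ([], []);
       ((st.1 ++ [st.2]).reverse).map List.reverse) := by
  cases S with
  | nil =>
    rw [parseLoopA]
    simp [PySem.List.enumerate_nil]
  | cons a t =>
    rw [parseLoopA]
    have hA : parseLoopA (a :: t) 1 ([] ++ [[a]]) 0 = [] ++ prep [a] (Hgrp t) :=
      parseLoopA_spec t (a :: t) 1 [] [a] (by omega) (by simp)
    simp only [List.nil_append] at hA
    rw [List.foldl_reverse, PySem.List.enumerate_cons, List.foldr_cons]
    simp only [zero_add]
    rw [foldr_enumerate_eq_Rb t 1 (by omega)]
    simp only [List.length_cons, Nat.zero_lt_succ, if_true]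
    have hc : ((a.length == 3) && decide ((0 : Nat) < 0)) = false := by simp
    have hc0 : ((a.length == 3) && decide ((0 : Int) < 0)) = false := by simp
    simp only [hc, hc0, Bool.false_eq_true, if_false, List.getD, List.getElem?_cons_zero,
      Option.getD_some, List.set_cons_zero, List.nil_append]
    rw [hA]
    exact (Rb_finish t a).symm

-- ===== VERDICT (by name: the statement is the Claim_ definition above) =====
theorem parse_spec : Claim_equal_parse := by
  intro input_data _
  unfold Spec_parse parse parse_alt
  exact core_eq _
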